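-- pv_equiv track=rewrite | github.com/JiwenXu66/PSI-TL | First.Layer/FunctionOne.py | Protein_DNA_interface_propensity_Schneide_11
-- ===== SOURCE A (Python) =====
-- def Protein_DNA_interface_propensity_Schneide_11(seq):
--     class1 = ('G','K','N','Q','R','S','T','Y'); class2 = ('A','D','E','F','H','I','L','V','W'); class3 = ('C','M','P')
--     ca_map = { char: 1 for char in class1 } #设置映射字典，并完成class1的映射
--     for char in class2:
--         ca_map[char] = 2
--     for char in class3:
--         ca_map[char] = 3
--     transformed_seq = ''.join(str(ca_map.get(char, '?')) for char in seq)
--     return transformed_seq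
-- ===== SOURCE B (Python) =====
-- def Protein_DNA_interface_propensity_Schneide_11(seq):
--     out = ['?'] * len(seq)
--     for digit, members in (('1', 'GKNQRSTY'), ('2', 'ADEFHILVW'), ('3', 'CMP')):
--         for i, ch in enumerate(seq):
--             if ch in members:
--                 out[i] = digit
--     return ''.join(out)
-- ===== Notes on version B (the rewrite author's own statement) =====
-- stated objective: alternative
-- what changed: Instead of building a char-to-int dict and looking each residue up, B preallocates an output buffer filled with the question-mark placeholder and makes three staged passes, one per class, stamping that class digit into the buffer at every index where the residue belongs to the class (correct because the classes are disjoint).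
import Mathlib
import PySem

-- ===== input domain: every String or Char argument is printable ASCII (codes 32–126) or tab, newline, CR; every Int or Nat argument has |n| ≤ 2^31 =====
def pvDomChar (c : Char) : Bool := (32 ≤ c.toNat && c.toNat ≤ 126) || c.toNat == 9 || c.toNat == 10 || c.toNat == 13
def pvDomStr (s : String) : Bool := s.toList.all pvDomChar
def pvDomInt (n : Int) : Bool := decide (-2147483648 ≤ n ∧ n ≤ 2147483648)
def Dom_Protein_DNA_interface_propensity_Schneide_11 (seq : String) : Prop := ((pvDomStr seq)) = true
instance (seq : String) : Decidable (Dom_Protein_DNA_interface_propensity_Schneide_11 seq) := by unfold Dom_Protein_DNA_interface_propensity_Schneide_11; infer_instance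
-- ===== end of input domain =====

-- B replaces A's dict lookup by a '?'-filled output buffer stamped in three class-wise passes; return value only.
-- ===== PORT A =====
def pvClass1 : List Char := ['G','K','N','Q','R','S','T','Y']
def pvClass2 : List Char := ['A','D','E','F','H','I','L','V','W']
def pvClass3 : List Char := ['C','M','P']

def pvCaMap : PySem.Dict Char Int :=
  let d := pvClass1.foldl (fun d c => d.insert c 1) PySem.Dict.empty
  let d := pvClass2.foldl (fun d c => d.insert c 2) d
  pvClass3.foldl (fun d c => d.insert c 3) d

def Protein_DNA_interface_propensity_Schneide_11 (seq : String) : String :=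
  PySem.Str.join "" (seq.toList.map (fun c =>
    match pvCaMap.get? c with
    | some n => PySem.Int.toStr n
    | none => "?"))

-- ===== PORT B =====
-- the (digit, members) pairs of Source B's outer loop
def pvGroups : List (String × List Char) :=
  [("1", ['G','K','N','Q','R','S','T','Y']),
   ("2", ['A','D','E','F','H','I','L','V','W']),
   ("3", ['C','M','P'])]

-- inner loop: for i, ch in enumerate(seq): if ch in members: out[i] = digit
def pvMark (s : List Char) (digit : String) (members : List Char) (out : List String) : List String :=
  (PySem.List.enumerate s).foldl
    (fun out p => if members.contains p.2 then PySem.List.pySetD out p.1 digit else out) out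

def Protein_DNA_interface_propensity_Schneide_11_alt (seq : String) : String :=
  let out := PySem.List.pyRepeat ["?"] (PySem.Str.len seq)
  let out := pvGroups.foldl (fun out g => pvMark seq.toList g.1 g.2 out) out
  PySem.Str.join "" out

-- ===== PRECONDITION & SPEC =====
def Spec_Protein_DNA_interface_propensity_Schneide_11 (seq : String) (out : String) : Prop := out = Protein_DNA_interface_propensity_Schneide_11_alt seq
instance (seq : String) (out : String) : Decidable (Spec_Protein_DNA_interface_propensity_Schneide_11 seq out) := by unfold Spec_Protein_DNA_interface_propensity_Schneide_11; infer_instance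

-- ===== CLAIM (what is proved, stated in full; the proofs are below) =====
def Claim_equal_Protein_DNA_interface_propensity_Schneide_11 : Prop := ∀ (seq : String), Dom_Protein_DNA_interface_propensity_Schneide_11 seq → Spec_Protein_DNA_interface_propensity_Schneide_11 seq (Protein_DNA_interface_propensity_Schneide_11 seq)

-- ===== LEMMAS AND PROOFS =====

-- generalized inner-pass invariant: stamping over enumerate from index a.length rewrites only the b part
theorem pvMark_go (d : String) (m : List Char) :
    ∀ (s : List Char) (a b : List String), b.length = s.length →
    (PySem.List.enumerate s (a.length : Int)).foldl
      (fun out p => if m.contains p.2 then PySem.List.pySetD out p.1 d else out) (a ++ b)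
    = a ++ (s.zip b).map (fun p => if m.contains p.1 then d else p.2) := by
  intro s
  induction s with
  | nil => intro a b h; simp at h; simp [h, PySem.List.enumerate]
  | cons c cs ih =>
    intro a b h
    cases b with
    | nil => simp at h
    | cons x bs =>
      simp only [List.length_cons] at h
      rw [PySem.List.enumerate_cons]
      simp only [List.foldl_cons]
      have step : (if m.contains c then PySem.List.pySetD (a ++ x :: bs) ((a.length : Int)) d
                   else (a ++ x :: bs))
          = (a ++ [if m.contains c then d else x]) ++ bs := by
        by_cases hc : c ∈ m
        · simp [hc, PySem.List.pySetD_natCast, List.set_append_right]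
        · simp [hc]
      rw [step]
      have hlen : ((a.length : Int) + 1) = (((a ++ [if m.contains c then d else x]).length : Nat) : Int) := by
        simp
      rw [hlen, ih (a ++ [if m.contains c then d else x]) bs (by omega)]
      simp

theorem pvMark_spec (d : String) (m : List Char) (s : List Char) (b : List String)
    (h : b.length = s.length) :
    pvMark s d m b = (s.zip b).map (fun p => if m.contains p.1 then d else p.2) := by
  have := pvMark_go d m s [] b h
  simpa [pvMark, PySem.List.enumerate] using this

theorem zip_map_map (s : List Char) (g : Char → String) (h : Char × String → String) :
    ((s.zip (s.map g)).map h) = s.map (fun c => h (c, g c)) := by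
  induction s with
  | nil => rfl
  | cons c cs ih => simp [ih]

-- the per-character value B's three passes produce
def pvStamp (c : Char) : String :=
  if (['C','M','P'] : List Char).contains c then "3"
  else if (['A','D','E','F','H','I','L','V','W'] : List Char).contains c then "2"
  else if (['G','K','N','Q','R','S','T','Y'] : List Char).contains c then "1"
  else "?"

theorem alt_eq_map (seq : String) :
    Protein_DNA_interface_propensity_Schneide_11_alt seq
    = PySem.Str.join "" (seq.toList.map pvStamp) := by
  unfold Protein_DNA_interface_propensity_Schneide_11_alt
  simp only [pvGroups, List.foldl_cons, List.foldl_nil]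
  have hinit : PySem.List.pyRepeat (["?"] : List String) (PySem.Str.len seq)
      = seq.toList.map (fun _ => "?") := by
    rw [PySem.List.pyRepeat_singleton]
    simp [PySem.Str.len, List.map_const']
  rw [hinit]
  have e1 : pvMark seq.toList "1" ['G','K','N','Q','R','S','T','Y'] (seq.toList.map (fun _ => "?"))
      = seq.toList.map (fun c => if (['G','K','N','Q','R','S','T','Y'] : List Char).contains c then "1" else "?") := by
    rw [pvMark_spec _ _ _ _ (by simp), zip_map_map]
  rw [e1]
  have e2 : pvMark seq.toList "2" ['A','D','E','F','H','I','L','V','W']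
      (seq.toList.map (fun c => if (['G','K','N','Q','R','S','T','Y'] : List Char).contains c then "1" else "?"))
      = seq.toList.map (fun c => if (['A','D','E','F','H','I','L','V','W'] : List Char).contains c then "2"
          else if (['G','K','N','Q','R','S','T','Y'] : List Char).contains c then "1" else "?") := by
    rw [pvMark_spec _ _ _ _ (by simp), zip_map_map]
  rw [e2]
  have e3 : pvMark seq.toList "3" ['C','M','P']
      (seq.toList.map (fun c => if (['A','D','E','F','H','I','L','V','W'] : List Char).contains c then "2"
          else if (['G','K','N','Q','R','S','T','Y'] : List Char).contains c then "1" else "?"))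
      = seq.toList.map (fun c => if (['C','M','P'] : List Char).contains c then "3"
          else if (['A','D','E','F','H','I','L','V','W'] : List Char).contains c then "2"
          else if (['G','K','N','Q','R','S','T','Y'] : List Char).contains c then "1" else "?") := by
    rw [pvMark_spec _ _ _ _ (by simp), zip_map_map]
  rw [e3]
  rfl

theorem pvCaMap_eq : pvCaMap = PySem.Dict.mk
    [('G',1),('K',1),('N',1),('Q',1),('R',1),('S',1),('T',1),('Y',1),
     ('A',2),('D',2),('E',2),('F',2),('H',2),('I',2),('L',2),('V',2),('W',2),
     ('C',3),('M',3),('P',3)] := by decide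

theorem per_char (c : Char) :
    (match pvCaMap.get? c with
     | some n => PySem.Int.toStr n
     | none => "?") = pvStamp c := by
  by_cases hG : c = 'G'
  · subst hG; decide
  by_cases hK : c = 'K'
  · subst hK; decide
  by_cases hN : c = 'N'
  · subst hN; decide
  by_cases hQ : c = 'Q'
  · subst hQ; decide
  by_cases hR : c = 'R'
  · subst hR; decide
  by_cases hS : c = 'S'
  · subst hS; decide
  by_cases hT : c = 'T'
  · subst hT; decide
  by_cases hY : c = 'Y'
  · subst hY; decide
  by_cases hA : c = 'A'
  · subst hA; decide
  by_cases hD : c = 'D'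
  · subst hD; decide
  by_cases hE : c = 'E'
  · subst hE; decide
  by_cases hF : c = 'F'
  · subst hF; decide
  by_cases hH : c = 'H'
  · subst hH; decide
  by_cases hI : c = 'I'
  · subst hI; decide
  by_cases hL : c = 'L'
  · subst hL; decide
  by_cases hV : c = 'V'
  · subst hV; decide
  by_cases hW : c = 'W'
  · subst hW; decide
  by_cases hC : c = 'C'
  · subst hC; decide
  by_cases hM : c = 'M'
  · subst hM; decide
  by_cases hP : c = 'P'
  · subst hP; decide
  simp [pvCaMap_eq, pvStamp, PySem.Dict.get?_mk_cons, PySem.Dict.get?, hG, Ne.symm hG, hK, Ne.symm hK, hN, Ne.symm hN, hQ, Ne.symm hQ, hR, Ne.symm hR, hS, Ne.symm hS, hT, Ne.symm hT, hY, Ne.symm hY, hA, Ne.symm hA, hD, Ne.symm hD, hE, Ne.symm hE, hF, Ne.symm hF, hH, Ne.symm hH, hI, Ne.symm hI, hL, Ne.symm hL, hV, Ne.symm hV, hW, Ne.symm hW, hC, Ne.symm hC, hM, Ne.symm hM, hP, Ne.symm hP]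

-- ===== VERDICT (by name: the statement is the Claim_ definition above) =====
theorem Protein_DNA_interface_propensity_Schneide_11_spec : Claim_equal_Protein_DNA_interface_propensity_Schneide_11 := by
  intro seq _
  unfold Spec_Protein_DNA_interface_propensity_Schneide_11
  rw [alt_eq_map]
  unfold Protein_DNA_interface_propensity_Schneide_11
  congr 1
  exact List.map_congr_left (fun c _ => per_char c)
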